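-- pv_equiv track=rewrite | github.com/Alamobot/main | DZ_6-2.py | more_num
-- ===== SOURCE A (Python) =====
-- def more_num(list: list) -> int:
--
--     sum = 0
--     index = 0
--
--     for i in range(len(list)):
--         if list[i] > sum:
--             sum = list[i]
--             index = i + 1
--
--     return index
-- ===== SOURCE B (Python) =====
-- def more_num(list: list) -> int:
--     if not list:
--         return 0
--     m = max(list)
--     if m <= 0:
--         return 0
--     return list.index(m) + 1
-- ===== Notes on version B (the rewrite author's own statement) =====
-- stated objective: simpler
-- what changed: Replaces the single interleaved running-max-with-index loop by two library calls: compute m = max(list), then return list.index(m) + 1 if m > 0 else 0.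
import Mathlib
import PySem

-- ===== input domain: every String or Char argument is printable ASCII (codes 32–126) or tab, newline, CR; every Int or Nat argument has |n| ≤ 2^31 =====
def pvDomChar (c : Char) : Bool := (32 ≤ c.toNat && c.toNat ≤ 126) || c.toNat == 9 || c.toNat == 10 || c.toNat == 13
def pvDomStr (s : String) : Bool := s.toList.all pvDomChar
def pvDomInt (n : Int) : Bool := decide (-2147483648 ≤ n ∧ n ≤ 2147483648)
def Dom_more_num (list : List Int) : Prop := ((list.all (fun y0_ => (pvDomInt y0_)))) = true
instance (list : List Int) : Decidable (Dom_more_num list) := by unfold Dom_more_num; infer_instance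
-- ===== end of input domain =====

-- B replaces A's single interleaved running-max-with-index loop by max(list) followed by list.index(m); objective: simpler.

-- ===== PORT A =====
-- the for-loop over range(len(list)) reading list[i], with running state (sum, index); i is the 0-based position
def moreLoopA : List Int → Int → Int → Int → Int
  | [], _, index, _ => index
  | x :: xs, sum, index, i =>
    if x > sum then moreLoopA xs x (i + 1) (i + 1)
    else moreLoopA xs sum index (i + 1)

def more_num (list : List Int) : Int := moreLoopA list 0 0 0

-- ===== PORT B =====
def more_num_alt (list : List Int) : Int :=
  match list with
  | [] => 0
  | _ =>
    match PySem.List.max? list (fun x => x) with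
    | none => 0  -- unreachable: list is nonempty
    | some m =>
      if m ≤ 0 then 0
      else
        match PySem.List.index? list m with
        | some k => (k : Int) + 1
        | none => 0  -- unreachable: m ∈ list

-- ===== PRECONDITION & SPEC =====
def Spec_more_num (list : List Int) (out : Int) : Prop := out = more_num_alt list
instance (list : List Int) (out : Int) : Decidable (Spec_more_num list out) := by unfold Spec_more_num; infer_instance

-- ===== CLAIM (what is proved, stated in full; the proofs are below) =====
def Claim_equal_more_num : Prop := ∀ (list : List Int), Dom_more_num list → Spec_more_num list (more_num list)

-- ===== LEMMAS AND PROOFS =====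

lemma foldl_max_cons (t : List Int) (a b : Int) :
    List.foldl max (max a b) t = max a (List.foldl max b t) := by
  induction t generalizing b with
  | nil => simp
  | cons y t ih =>
    simp only [List.foldl_cons]
    rw [max_assoc, ih]

-- characterisation of A's loop: it returns i + 1 + (first index of the maximum) when the
-- maximum beats the running value `sum`, and the carried `index` otherwise
lemma moreLoopA_char (xs : List Int) : ∀ (sum index i : Int),
    moreLoopA xs sum index i =
      match PySem.List.max? xs (fun x => x) with
      | none => index
      | some m =>
        if sum < m then i + 1 + ((PySem.List.index? xs m).getD 0 : Int) else index := by
  induction xs with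
  | nil => intro s index i; simp [moreLoopA, PySem.List.max?]
  | cons x xs ih =>
    intro s index i
    cases hmx : PySem.List.max? xs (fun x => x) with
    | none =>
      have hnil : xs = [] := (PySem.List.max?_eq_none_iff _ _).1 hmx
      subst hnil
      by_cases hx : s < x <;>
        simp [moreLoopA, hx, PySem.List.max?, PySem.List.index?, not_lt.2, *]
    | some m' =>
      have hm'mem : m' ∈ xs := PySem.List.max?_mem hmx
      obtain ⟨k, hk⟩ : ∃ k, PySem.List.index? xs m' = some k := by
        have := (PySem.List.index?_isSome_iff (xs := xs) (v := m')).2 hm'mem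
        exact Option.isSome_iff_exists.1 this
      have hmax : PySem.List.max? (x :: xs) (fun x => x) = some (max x m') := by
        cases xs with
        | nil => simp [PySem.List.max?] at hmx
        | cons y t =>
          rw [PySem.List.max?_id_cons] at hmx ⊢
          have h2 : List.foldl max y t = m' := Option.some.inj hmx
          simp only [List.foldl_cons]
          rw [foldl_max_cons, h2]
      rw [hmax]
      by_cases hxs : x > s
      · simp only [moreLoopA, if_pos hxs]
        rw [ih]
        simp only [hmx]
        by_cases hxm : x < m'
        · have hne : x ≠ m' := ne_of_lt hxm
          have hidx : PySem.List.index? (x :: xs) m' = some (k + 1) := by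
            rw [PySem.List.index?_cons_of_ne xs hne, hk]; rfl
          rw [if_pos hxm]
          have : max x m' = m' := max_eq_right (le_of_lt hxm)
          rw [this, if_pos (lt_trans hxs hxm), hidx, hk]
          simp; omega
        · have : max x m' = x := max_eq_left (not_lt.1 hxm)
          rw [if_neg hxm, this, if_pos hxs]
          have hidx : PySem.List.index? (x :: xs) x = some 0 := PySem.List.index?_cons_self x xs
          rw [hidx]
          simp
      · simp only [moreLoopA, if_neg hxs]
        rw [ih]
        simp only [hmx]
        have hxle : x ≤ s := not_lt.1 hxs
        by_cases hsm : s < m'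
        · have hne : x ≠ m' := ne_of_lt (lt_of_le_of_lt hxle hsm)
          have hidx : PySem.List.index? (x :: xs) m' = some (k + 1) := by
            rw [PySem.List.index?_cons_of_ne xs hne, hk]; rfl
          have : max x m' = m' := max_eq_right (le_of_lt (lt_of_le_of_lt hxle hsm))
          rw [this, if_pos hsm, if_pos hsm, hidx, hk]
          simp; omega
        · have : ¬ s < max x m' := by
            rw [not_lt, max_le_iff]; exact ⟨hxle, not_lt.1 hsm⟩
          rw [if_neg hsm, if_neg this]

-- ===== VERDICT (by name: the statement is the Claim_ definition above) =====
theorem more_num_spec : Claim_equal_more_num := by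
  intro list _
  unfold Spec_more_num more_num more_num_alt
  rw [moreLoopA_char]
  cases hmx : PySem.List.max? list (fun x => x) with
  | none =>
    have : list = [] := (PySem.List.max?_eq_none_iff _ _).1 hmx
    subst this; rfl
  | some m =>
    have hne : list ≠ [] := by
      intro h; subst h; simp [PySem.List.max?] at hmx
    have hmem : m ∈ list := PySem.List.max?_mem hmx
    obtain ⟨k, hk⟩ : ∃ k, PySem.List.index? list m = some k := by
      have := (PySem.List.index?_isSome_iff (xs := list) (v := m)).2 hmem
      exact Option.isSome_iff_exists.1 this
    cases list with
    | nil => exact absurd rfl hne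
    | cons y t =>
      simp only [hk, Option.getD_some]
      by_cases hm : (0 : Int) < m
      · simp only [if_pos hm, if_neg (not_le.2 hm)]
        ring
      · simp only [if_neg hm, if_pos (not_lt.1 hm)]
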